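-- pv_equiv track=rewrite | github.com/tjfehdgns1/AlgorithmPerDay | ClosestChar.py | solution
-- ===== SOURCE A (Python) =====
-- def solution(s):
--     a = []
--     for i, char in enumerate(s) :
--         if char in s[:i] :
--             a.append('-1')
--         if char in s[:i] and s[:i].count(char) > 1 :
--             pass
--     return a # 못풀음
-- ===== SOURCE B (Python) =====
-- def solution(s):
--     return ['-1'] * (len(s) - len(set(s)))
-- ===== Notes on version B (the rewrite author's own statement) =====
-- stated objective: faster
-- what changed: Replaced the per-index prefix-membership scan (quadratic slicing loop) by the closed form ['-1'] * (len(s) - len(set(s))), since A appends the constant '-1' exactly once per non-first occurrence of a character.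
import Mathlib
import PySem

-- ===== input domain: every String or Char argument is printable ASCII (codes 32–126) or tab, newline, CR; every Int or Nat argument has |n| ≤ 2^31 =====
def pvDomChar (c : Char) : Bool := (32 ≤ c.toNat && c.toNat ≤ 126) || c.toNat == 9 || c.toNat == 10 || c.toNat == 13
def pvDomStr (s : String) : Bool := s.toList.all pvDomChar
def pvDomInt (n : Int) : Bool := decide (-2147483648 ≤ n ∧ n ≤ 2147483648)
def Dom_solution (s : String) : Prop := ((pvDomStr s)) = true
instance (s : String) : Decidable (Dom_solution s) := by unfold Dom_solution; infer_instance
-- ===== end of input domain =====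

-- B replaces A's quadratic per-index prefix scan by the closed form ['-1'] * (len(s) - len(set(s))).

-- ===== PORT A =====
-- for i, char in enumerate(s): if char in s[:i]: a.append('-1'); the second `if` has a `pass`
-- body and is dropped. i ≥ 0 so s[:i] = take i, and membership of a 1-char string in a string
-- equals Char membership in the prefix's char list (exact).
def solution (s : String) : List String :=
  (PySem.List.enumerate s.toList 0).foldl
    (fun a p => if p.2 ∈ s.toList.take p.1.toNat then a ++ ["-1"] else a) []

-- ===== PORT B =====
-- return ['-1'] * (len(s) - len(set(s)))
def solution_alt (s : String) : List String :=
  List.replicate (s.toList.length - (PySem.Set.ofList s.toList).length) "-1"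

-- ===== PRECONDITION & SPEC =====
def Spec_solution (s : String) (out : List String) : Prop := out = solution_alt s
instance (s : String) (out : List String) : Decidable (Spec_solution s out) := by unfold Spec_solution; infer_instance

-- ===== CLAIM (what is proved, stated in full; the proofs are below) =====
def Claim_equal_solution : Prop := ∀ (s : String), Dom_solution s → Spec_solution s (solution s)

-- ===== LEMMAS AND PROOFS =====

-- A's loop over any char list computes B's closed form (reverse induction on the list).
lemma loop_eq_replicate (l : List Char) :
    (PySem.List.enumerate l 0).foldl
      (fun a p => if p.2 ∈ l.take p.1.toNat then a ++ ["-1"] else a) []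
    = List.replicate (l.length - (PySem.Set.ofList l).length) "-1" := by
  induction l using List.reverseRecOn with
  | nil => simp [PySem.List.enumerate, PySem.Set.ofList]
  | append_singleton l c ih =>
    rw [PySem.List.enumerate_append]
    simp only [List.foldl_append]
    have hcong :
        List.foldl (fun (a : List String) (p : Int × Char) =>
            if p.2 ∈ (l ++ [c]).take p.1.toNat then a ++ ["-1"] else a) []
          (PySem.List.enumerate l)
        = List.foldl (fun (a : List String) (p : Int × Char) =>
            if p.2 ∈ l.take p.1.toNat then a ++ ["-1"] else a) []
          (PySem.List.enumerate l) := by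
      apply PySem.List.foldl_congr_mem
      intro acc x hx
      rcases (PySem.List.mem_enumerate_iff _ _ _).1 hx with ⟨k, hk, rfl⟩
      simp only [Int.toNat_natCast, zero_add]
      rw [List.take_append_of_le_length (by omega)]
    rw [hcong, ih]
    have hle := PySem.Set.length_ofList_le (xs := l)
    rw [PySem.Set.ofList_append_singleton]
    simp only [PySem.List.enumerate] at *
    by_cases hc : c ∈ l
    · have hadd : PySem.Set.add (PySem.Set.ofList l) c = PySem.Set.ofList l := by
        unfold PySem.Set.add
        simp [PySem.Set.contains, PySem.Set.mem_ofList, hc]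
      rw [hadd]
      simp only [List.foldl_cons, List.foldl_nil]
      rw [List.take_left' (by omega)]
      simp only [hc, if_true, List.length_append, List.length_singleton]
      rw [show l.length + 1 - (PySem.Set.ofList l).length
            = (l.length - (PySem.Set.ofList l).length) + 1 by omega]
      simp [List.replicate_succ']
    · have hadd : PySem.Set.add (PySem.Set.ofList l) c = PySem.Set.ofList l ++ [c] := by
        unfold PySem.Set.add
        simp [PySem.Set.contains, PySem.Set.mem_ofList, hc]
      rw [hadd]
      simp only [List.foldl_cons, List.foldl_nil]
      rw [List.take_left' (by omega)]
      simp only [hc, if_false, List.length_append, List.length_singleton]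
      congr 1
      omega

-- ===== VERDICT (by name: the statement is the Claim_ definition above) =====
theorem solution_spec : Claim_equal_solution := by
  intro s _
  unfold Spec_solution solution solution_alt
  exact loop_eq_replicate s.toList
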